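-- pv_equiv track=rewrite | github.com/KDhiraj152/Shiksha-setu | backend/validate/ncert.py | validate_terminology
-- ===== SOURCE A (Python) =====
-- from typing import Dict, Any, List, Optional
--
-- def validate_terminology(
--
--     text: str,
--     subject: str,
--     grade_level: int
-- ) -> List[str]:
--     """
--     Validate terminology appropriateness for grade level.
--
--     Args:
--         text: Content text
--         subject: Subject area
--         grade_level: Grade level
--
--     Returns:
--         List of terminology issues
--     """
--     issues = []
--
--     # Subject-specific terminology checks
--     if subject.lower() == "mathematics":
--         complex_terms = ["calculus", "derivative", "integral"]
--         if grade_level < 11: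
--             for term in complex_terms:
--                 if term.lower() in text.lower():
--                     issues.append(
--                         f"Advanced term '{term}' may be inappropriate for Grade {grade_level}"
--                     )
--
--     elif subject.lower() == "science":
--         complex_terms = ["quantum", "thermodynamics", "electromagnetism"]
--         if grade_level < 9:
--             for term in complex_terms:
--                 if term.lower() in text.lower():
--                     issues.append(
--                         f"Advanced term '{term}' may be inappropriate for Grade {grade_level}"
--                     )
--
--     return issues
-- ===== SOURCE B (Python) =====
-- # B: single left-to-right scan of the text collecting all matched terms at each
-- # position into a set (multi-pattern scan), instead of one substring search per term.
-- RULES = [("mathematics", 11, ["calculus", "derivative", "integral"]),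
--          ("science", 9, ["quantum", "thermodynamics", "electromagnetism"])]
--
-- def validate_terminology(text, subject, grade_level):
--     subj = subject.lower()
--     for name, threshold, terms in RULES:
--         if subj == name and grade_level < threshold:
--             low = text.lower()
--             found = set()
--             for i in range(len(low)):
--                 found.update(t for t in terms if low.startswith(t, i))
--             return [f"Advanced term '{t}' may be inappropriate for Grade {grade_level}"
--                     for t in terms if t in found]
--     return []
-- ===== Notes on version B (the rewrite author's own statement) =====
-- stated objective: alternative
-- what changed: Instead of A's one substring search per hard-coded term inside two if/elif branches, B does a single left-to-right scan over the lowered text, collecting every term that starts at each position into a set (multi-pattern scan over a rule list), then emits messages for the found terms in rule order.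
import Mathlib
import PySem

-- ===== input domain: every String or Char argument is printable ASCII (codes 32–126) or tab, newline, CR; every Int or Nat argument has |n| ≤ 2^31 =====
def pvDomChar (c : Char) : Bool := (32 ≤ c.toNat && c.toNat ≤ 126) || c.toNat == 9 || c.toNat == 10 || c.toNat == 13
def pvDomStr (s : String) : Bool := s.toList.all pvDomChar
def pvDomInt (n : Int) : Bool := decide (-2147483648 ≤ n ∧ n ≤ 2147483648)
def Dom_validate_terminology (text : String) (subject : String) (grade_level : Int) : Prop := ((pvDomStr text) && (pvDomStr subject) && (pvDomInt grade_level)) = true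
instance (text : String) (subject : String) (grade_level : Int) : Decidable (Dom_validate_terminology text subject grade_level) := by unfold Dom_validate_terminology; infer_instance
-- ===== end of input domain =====

-- B replaces A's per-term substring searches by a single left-to-right scan of the
-- text that collects every matched term at each position into a set (objective: alternative).
-- ===== PORT A =====
-- the f-string message (shared by both Pythons verbatim)
def gradeMsg (term : String) (grade_level : Int) : String :=
  PySem.Str.join "" ["Advanced term '", term, "' may be inappropriate for Grade ", PySem.Int.toStr grade_level]

def validate_terminology (text : String) (subject : String) (grade_level : Int) : List String :=
  let issues : List String := []
  if PySem.Str.lower subject = "mathematics" then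
    let complex_terms := ["calculus", "derivative", "integral"]
    if grade_level < 11 then
      complex_terms.foldl (fun issues term =>
        if PySem.Str.isIn (PySem.Str.lower term) (PySem.Str.lower text) then
          issues ++ [gradeMsg term grade_level]
        else issues) issues
    else issues
  else if PySem.Str.lower subject = "science" then
    let complex_terms := ["quantum", "thermodynamics", "electromagnetism"]
    if grade_level < 9 then
      complex_terms.foldl (fun issues term =>
        if PySem.Str.isIn (PySem.Str.lower term) (PySem.Str.lower text) then
          issues ++ [gradeMsg term grade_level]
        else issues) issues
    else issues
  else issues

-- ===== PORT B =====
def vtRules : List (String × Int × List String) :=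
  [("mathematics", 11, ["calculus", "derivative", "integral"]),
   ("science", 9, ["quantum", "thermodynamics", "electromagnetism"])]

-- found.update(t for t in terms if low.startswith(t, i)) for one position i;
-- low.startswith(t, i) with 0 ≤ i < len(low) is exactly t.toList <+: low.drop i.toNat
def vtScan (low : List Char) (terms : List String) : PySem.Set String :=
  (PySem.List.pyRange 0 low.length 1).foldl
    (fun found i =>
      PySem.Set.update found (terms.filter (fun t => t.toList.isPrefixOf (low.drop i.toNat))))
    PySem.Set.empty

-- the 'for name, threshold, terms in RULES' loop with its early return
def vtLoop : List (String × Int × List String) → String → String → Int → List String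
  | [], _, _, _ => []
  | (name, threshold, terms) :: rest, subj, text, g =>
    if subj = name ∧ g < threshold then
      let low := (PySem.Str.lower text).toList
      let found := vtScan low terms
      (terms.filter (fun t => PySem.Set.contains found t)).map (fun t => gradeMsg t g)
    else vtLoop rest subj text g

def validate_terminology_alt (text : String) (subject : String) (grade_level : Int) : List String :=
  vtLoop vtRules (PySem.Str.lower subject) text grade_level

-- ===== PRECONDITION & SPEC =====
def Spec_validate_terminology (text : String) (subject : String) (grade_level : Int) (out : List String) : Prop := out = validate_terminology_alt text subject grade_level
instance (text : String) (subject : String) (grade_level : Int) (out : List String) : Decidable (Spec_validate_terminology text subject grade_level out) := by unfold Spec_validate_terminology; infer_instance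

-- ===== CLAIM (what is proved, stated in full; the proofs are below) =====
def Claim_equal_validate_terminology : Prop := ∀ (text : String) (subject : String) (grade_level : Int), Dom_validate_terminology text subject grade_level → Spec_validate_terminology text subject grade_level (validate_terminology text subject grade_level)

-- ===== LEMMAS AND PROOFS =====

-- membership after a fold of set-updates
lemma mem_foldl_update {α β : Type} [BEq α] [LawfulBEq α] (f : β → List α)
    (l : List β) (s : PySem.Set α) (y : α) :
    y ∈ l.foldl (fun s b => PySem.Set.update s (f b)) s ↔ y ∈ s ∨ ∃ b ∈ l, y ∈ f b := by
  induction l generalizing s with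
  | nil => simp
  | cons b l ih =>
    simp [List.foldl, ih, PySem.Set.mem_update]
    tauto

-- a term found by the positional scan ⟺ it is an (occurring) member of terms
lemma contains_vtScan (low : List Char) (terms : List String) (t : String)
    (htm : t ∈ terms) (ht : t.toList ≠ []) :
    PySem.Set.contains (vtScan low terms) t = PySem.Chars.isIn t.toList low := by
  rcases h : PySem.Chars.isIn t.toList low with _ | _
  · -- not an infix: no position matches
    rw [PySem.Chars.isIn_eq_false_iff] at h
    rcases hc : PySem.Set.contains (vtScan low terms) t with _ | _
    · rfl
    · exfalso
      rw [PySem.Set.contains_iff] at hc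
      unfold vtScan at hc
      rw [mem_foldl_update] at hc
      rcases hc with hc | ⟨i, _, hi⟩
      · simp [PySem.Set.empty] at hc
      · rw [List.mem_filter] at hi
        exact h ((List.prefix_iff_eq_take.mp
          (List.isPrefixOf_iff_prefix.mp hi.2)).symm ▸
          ((low.drop i.toNat).take_prefix t.toList.length).isInfix.trans
            (low.drop_suffix i.toNat).isInfix)
  · -- infix: some position 0 ≤ i < len matches
    rw [PySem.Chars.isIn_iff_infix] at h
    rcases h with ⟨pre, suf, hps⟩
    rw [PySem.Set.contains_iff]
    unfold vtScan
    rw [mem_foldl_update]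
    refine Or.inr ⟨(pre.length : Int), ?_, ?_⟩
    · rw [PySem.List.mem_pyRange_one]
      constructor
      · exact_mod_cast Nat.zero_le _
      · have : pre.length + t.toList.length ≤ low.length := by
          rw [← hps]; simp [List.length_append]
        have ht' : 0 < t.toList.length := List.length_pos_of_ne_nil ht
        exact_mod_cast by omega
    · rw [List.mem_filter]
      refine ⟨htm, List.isPrefixOf_iff_prefix.mpr ?_⟩
      have : low.drop pre.length = t.toList ++ suf := by
        rw [← hps, List.append_assoc, List.drop_left]
      simp [Int.toNat_natCast, this]

-- membership form of contains_vtScan, as it appears after unfolding List.filter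
lemma mem_vtScan (low : List Char) (terms : List String) (t : String)
    (htm : t ∈ terms) (ht : t.toList ≠ []) :
    t ∈ vtScan low terms ↔ PySem.Chars.isIn t.toList low = true := by
  rw [← PySem.Set.contains_iff _ _, contains_vtScan low terms t htm ht]

-- ===== VERDICT (by name: the statement is the Claim_ definition above) =====
theorem validate_terminology_spec : Claim_equal_validate_terminology := by
  intro text subject grade_level _
  unfold Spec_validate_terminology validate_terminology validate_terminology_alt
  simp only [vtRules, vtLoop]
  by_cases h1 : PySem.Str.lower subject = "mathematics"
  · by_cases hg : grade_level < 11
    · rw [if_pos h1, if_pos hg, h1, if_pos (⟨rfl, hg⟩ : ("mathematics" : String) = "mathematics" ∧ grade_level < 11)]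
      simp only [List.foldl, List.filter,
        show PySem.Str.lower "calculus" = "calculus" from by decide,
        show PySem.Str.lower "derivative" = "derivative" from by decide,
        show PySem.Str.lower "integral" = "integral" from by decide,
        PySem.Str.isIn_eq, PySem.Str.toList_lower]
      split_ifs <;>
        simp_all [mem_vtScan _ ["calculus", "derivative", "integral"] "calculus" (by decide) (by decide),
          mem_vtScan _ ["calculus", "derivative", "integral"] "derivative" (by decide) (by decide),
          mem_vtScan _ ["calculus", "derivative", "integral"] "integral" (by decide) (by decide)]
    · rw [if_pos h1, if_neg hg, h1,
        if_neg (fun h => hg h.2),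
        if_neg (fun h => by simpa using h.1)]
  · by_cases h2 : PySem.Str.lower subject = "science"
    · by_cases hg : grade_level < 9
      · rw [if_neg h1, if_pos h2, if_pos hg, h2,
          if_neg (fun h => by simpa using h.1),
          if_pos (⟨rfl, hg⟩ : ("science" : String) = "science" ∧ grade_level < 9)]
        simp only [List.foldl, List.filter,
          show PySem.Str.lower "quantum" = "quantum" from by decide,
          show PySem.Str.lower "thermodynamics" = "thermodynamics" from by decide,
          show PySem.Str.lower "electromagnetism" = "electromagnetism" from by decide,
          PySem.Str.isIn_eq, PySem.Str.toList_lower]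
        split_ifs <;>
          simp_all [mem_vtScan _ ["quantum", "thermodynamics", "electromagnetism"] "quantum" (by decide) (by decide),
            mem_vtScan _ ["quantum", "thermodynamics", "electromagnetism"] "thermodynamics" (by decide) (by decide),
            mem_vtScan _ ["quantum", "thermodynamics", "electromagnetism"] "electromagnetism" (by decide) (by decide)]
      · rw [if_neg h1, if_pos h2, if_neg hg, h2,
          if_neg (fun h => by simpa using h.1),
          if_neg (fun h => hg h.2)]
    · rw [if_neg h1, if_neg h2,
        if_neg (fun h => h1 h.1), if_neg (fun h => h2 h.1)]
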